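-- pv_equiv track=rewrite | github.com/nobu0605/Assignment6 | bitwise_operations.py | bitwise_operations
-- ===== SOURCE A (Python) =====
-- def bitwise_operations(numbers):
--     if not numbers:
--         # If the list is empty, return an error
--         return {"error": "No integers provided."}
--
--     # Initializing bitwise operations with the first number
--     bitwise_and = numbers[0]
--     bitwise_or = numbers[0]
--     bitwise_xor = numbers[0]
--
--     # Applying bitwise operations on the list of numbers
--     for num in numbers[1:]:
--         bitwise_and &= num
--         bitwise_or |= num
--         bitwise_xor ^= num
--
--     # Returning the results as a dictionary
--     return {
--         "and": bitwise_and,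
--         "or": bitwise_or,
--         "xor": bitwise_xor
--     }
-- ===== SOURCE B (Python) =====
-- def bitwise_operations(numbers):
--     if not numbers:
--         return {"error": "No integers provided."}
--
--     # Divide-and-conquer reduction: split the list in half, reduce each half
--     # recursively, combine with the operation (valid because &, | and ^ are
--     # associative).
--     def tree(op, xs):
--         if len(xs) == 1:
--             return xs[0]
--         mid = len(xs) // 2
--         return op(tree(op, xs[:mid]), tree(op, xs[mid:]))
--
--     return {
--         "and": tree(lambda a, b: a & b, numbers),
--         "or": tree(lambda a, b: a | b, numbers),
--         "xor": tree(lambda a, b: a ^ b, numbers),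
--     }
-- ===== Notes on version B (the rewrite author's own statement) =====
-- stated objective: alternative
-- what changed: A's single left-to-right loop threading three accumulators is replaced by a recursive divide-and-conquer tree reduction (halve the list, reduce each half, combine), run once per operation; equality rests on associativity of &, |, ^.
-- outside the precondition, e.g. on bitwise_operations([]): A returns {'error': 'No integers provided.'}, B returns {'error': 'No integers provided.'}
import Mathlib
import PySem

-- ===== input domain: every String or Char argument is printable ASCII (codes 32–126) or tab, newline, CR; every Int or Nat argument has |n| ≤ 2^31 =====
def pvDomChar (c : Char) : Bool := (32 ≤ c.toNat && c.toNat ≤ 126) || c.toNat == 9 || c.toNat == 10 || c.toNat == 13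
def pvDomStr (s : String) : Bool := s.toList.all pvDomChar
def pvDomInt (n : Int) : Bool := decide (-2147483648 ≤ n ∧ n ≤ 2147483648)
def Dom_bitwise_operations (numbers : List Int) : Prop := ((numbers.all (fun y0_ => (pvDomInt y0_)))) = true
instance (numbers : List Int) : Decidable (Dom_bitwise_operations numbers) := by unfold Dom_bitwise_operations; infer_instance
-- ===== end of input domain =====

-- B replaces A's single accumulator loop with a recursive divide-and-conquer tree reduction per operation (an alternative decomposition; correct because &, |, ^ are associative).

-- ===== PORT A =====
-- one pass over numbers[1:], threading the triple (and, or, xor)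
def bitwise_operations (numbers : List Int) : List (String × Int) :=
  match numbers with
  | [] => []  -- unreachable under Pre_: Python returns {"error": str}, not a str→int dict
  | n0 :: rest =>
      let acc := rest.foldl
        (fun (s : Int × Int × Int) num =>
          (PySem.Int.band s.1 num, PySem.Int.bor s.2.1 num, PySem.Int.bxor s.2.2 num))
        (n0, n0, n0)
      [("and", acc.1), ("or", acc.2.1), ("xor", acc.2.2)]

-- ===== PORT B =====
-- Python's tree(op, xs): if len(xs)==1 return xs[0]; mid = len(xs)//2; op(tree(xs[:mid]), tree(xs[mid:]))
-- (the [] branch is a Lean totality guard; Python never calls tree on an empty list)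
def treeReduce (op : Int → Int → Int) : List Int → Int
  | [] => 0
  | [x] => x
  | x :: y :: rest =>
      op (treeReduce op ((x :: y :: rest).take ((rest.length + 2) / 2)))
         (treeReduce op ((x :: y :: rest).drop ((rest.length + 2) / 2)))
termination_by xs => xs.length
decreasing_by
  · simp [List.length_take]; omega
  · simp

def bitwise_operations_alt (numbers : List Int) : List (String × Int) :=
  match numbers with
  | [] => []  -- unreachable under Pre_
  | _ :: _ =>
      [("and", treeReduce PySem.Int.band numbers),
       ("or",  treeReduce PySem.Int.bor  numbers),
       ("xor", treeReduce PySem.Int.bxor numbers)]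

-- ===== PRECONDITION & SPEC =====
-- Pre_ excludes the empty list: there Python A (and B) return {"error": "No integers provided."},
-- a str→str dict, which is not a value of the declared str→int type.
def Pre_bitwise_operations (numbers : List Int) : Prop := numbers ≠ []
instance (numbers : List Int) : Decidable (Pre_bitwise_operations numbers) := by
  unfold Pre_bitwise_operations; infer_instance

def pvWitness_bitwise_operations : List Int := [6, 3]

def Spec_bitwise_operations (numbers : List Int) (out : List (String × Int)) : Prop := out = bitwise_operations_alt numbers
instance (numbers : List Int) (out : List (String × Int)) : Decidable (Spec_bitwise_operations numbers out) := by unfold Spec_bitwise_operations; infer_instance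

-- ===== CLAIM (what is proved, stated in full; the proofs are below) =====
def Claim_equal_bitwise_operations : Prop := ∀ (numbers : List Int), Dom_bitwise_operations numbers → Pre_bitwise_operations numbers → Spec_bitwise_operations numbers (bitwise_operations numbers)

-- ===== LEMMAS AND PROOFS =====

-- bits of m&&&n and of ldiff m n partition the bits of m
theorem pv_and_add_ldiff (m : Nat) : ∀ n, (m &&& n) + Nat.ldiff m n = m := by
  induction m using Nat.binaryRec with
  | zero => intro n; simp [Nat.zero_and, Nat.ldiff]
  | bit b m ih =>
      intro n
      induction n using Nat.binaryRec with
      | zero =>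
          have h1 : Nat.bit b m &&& 0 = 0 := by simp
          have h2 : Nat.ldiff (Nat.bit b m) 0 = Nat.bit b m := by
            apply Nat.eq_of_testBit_eq; intro i; simp [Nat.testBit_ldiff]
          rw [h1, h2]; omega
      | bit c n _ =>
          rw [Nat.land_bit, Nat.ldiff_bit, Nat.bit_val, Nat.bit_val, Nat.bit_val]
          have := ih n
          cases b <;> cases c <;> simp at * <;> omega

theorem pv_sub_and_eq_ldiff (m n : Nat) : m - (m &&& n) = Nat.ldiff m n := by
  have := pv_and_add_ldiff m n; omega

-- PySem's Python-exact bitwise ops coincide with Mathlib's Int.land / Int.lor / Int.xor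
theorem pv_band_eq (a b : Int) : PySem.Int.band a b = Int.land a b := by
  rcases a with m | m <;> rcases b with n | n <;>
    simp [PySem.Int.band, Int.land, Int.negSucc_eq, pv_sub_and_eq_ldiff] <;> omega

theorem pv_bor_eq (a b : Int) : PySem.Int.bor a b = Int.lor a b := by
  rcases a with m | m <;> rcases b with n | n <;>
    simp [PySem.Int.bor, Int.lor, Int.negSucc_eq, pv_sub_and_eq_ldiff] <;> omega

theorem pv_bxor_eq (a b : Int) : PySem.Int.bxor a b = Int.xor a b := by
  rcases a with m | m <;> rcases b with n | n <;>
    simp [PySem.Int.bxor, Int.xor, Int.negSucc_eq] <;> omega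

-- extensionality for Int by bits
theorem pv_int_eq_of_testBit_eq (a b : Int) (h : ∀ i, a.testBit i = b.testBit i) : a = b := by
  rcases a with m | m <;> rcases b with n | n
  · exact congrArg Int.ofNat (Nat.eq_of_testBit_eq fun i => h i)
  · exfalso
    have hi := h (m + n)
    have hm : m.testBit (m + n) = false := Nat.testBit_lt_two_pow (lt_of_lt_of_le (Nat.lt_two_pow_self) (Nat.pow_le_pow_right (by norm_num) (Nat.le_add_right m n)))
    have hn : n.testBit (m + n) = false := Nat.testBit_lt_two_pow (lt_of_lt_of_le (Nat.lt_two_pow_self) (Nat.pow_le_pow_right (by norm_num) (Nat.le_add_left n m)))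
    simp [Int.testBit, hm, hn] at hi
  · exfalso
    have hi := h (m + n)
    have hm : m.testBit (m + n) = false := Nat.testBit_lt_two_pow (lt_of_lt_of_le (Nat.lt_two_pow_self) (Nat.pow_le_pow_right (by norm_num) (Nat.le_add_right m n)))
    have hn : n.testBit (m + n) = false := Nat.testBit_lt_two_pow (lt_of_lt_of_le (Nat.lt_two_pow_self) (Nat.pow_le_pow_right (by norm_num) (Nat.le_add_left n m)))
    simp [Int.testBit, hm, hn] at hi
  · have : m = n := Nat.eq_of_testBit_eq fun i => by
      have := h i; simpa [Int.testBit] using this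
    exact congrArg Int.negSucc this

theorem pv_band_assoc (a b c : Int) :
    PySem.Int.band (PySem.Int.band a b) c = PySem.Int.band a (PySem.Int.band b c) := by
  simp only [pv_band_eq]
  exact pv_int_eq_of_testBit_eq _ _ fun i => by simp [Int.testBit_land, Bool.and_assoc]

theorem pv_bor_assoc (a b c : Int) :
    PySem.Int.bor (PySem.Int.bor a b) c = PySem.Int.bor a (PySem.Int.bor b c) := by
  simp only [pv_bor_eq]
  exact pv_int_eq_of_testBit_eq _ _ fun i => by simp [Int.testBit_lor, Bool.or_assoc]

theorem pv_bxor_assoc (a b c : Int) :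
    PySem.Int.bxor (PySem.Int.bxor a b) c = PySem.Int.bxor a (PySem.Int.bxor b c) := by
  simp only [pv_bxor_eq]
  exact pv_int_eq_of_testBit_eq _ _ fun i => by simp [Int.testBit_lxor]

-- pulling an assoc op out of a left fold
theorem pv_foldl_pull (op : Int → Int → Int)
    (hassoc : ∀ a b c, op (op a b) c = op a (op b c)) :
    ∀ (l : List Int) (a b : Int), l.foldl op (op a b) = op a (l.foldl op b) := by
  intro l
  induction l with
  | nil => intro a b; rfl
  | cons h t ih => intro a b; simpa [List.foldl, hassoc] using ih a (op b h)

-- tree reduction of a nonempty list equals the left fold from its head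
theorem pv_tree_eq_foldl (op : Int → Int → Int)
    (hassoc : ∀ a b c, op (op a b) c = op a (op b c)) :
    ∀ (x : Int) (t : List Int), treeReduce op (x :: t) = t.foldl op x := by
  suffices H : ∀ n (x : Int) (t : List Int), (x :: t).length ≤ n →
      treeReduce op (x :: t) = t.foldl op x by
    intro x t; exact H (x :: t).length x t le_rfl
  intro n
  induction n with
  | zero => intro x t h; simp at h
  | succ n ih =>
      intro x t hlen
      match t with
      | [] => simp [treeReduce]
      | y :: rest =>
          rw [treeReduce]
          set mid := (rest.length + 2) / 2 with hmid
          have hn2 : rest.length + 2 ≤ n + 1 := by simpa using hlen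
          have hmid1 : 1 ≤ mid := by omega
          have hmidlt : mid < rest.length + 2 := by omega
          -- the two halves
          have htake : (x :: y :: rest).take mid = x :: (y :: rest).take (mid - 1) := by
            cases hm : mid with
            | zero => omega
            | succ k => simp [List.take_succ_cons]
          obtain ⟨d0, dt, hdrop⟩ : ∃ d0 dt, (x :: y :: rest).drop mid = d0 :: dt := by
            have : ((x :: y :: rest).drop mid).length = rest.length + 2 - mid := by simp
            cases hd : (x :: y :: rest).drop mid with
            | nil => rw [hd] at this; simp at this; omega
            | cons d0 dt => exact ⟨d0, dt, rfl⟩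
          rw [htake, hdrop]
          have ht1 : (x :: (y :: rest).take (mid - 1)).length ≤ n := by
            simp [List.length_take]; omega
          have ht2 : (d0 :: dt).length ≤ n := by
            have h3 : ((x :: y :: rest).drop mid).length = rest.length + 2 - mid := by simp
            rw [hdrop] at h3; simp at h3 ⊢; omega
          rw [ih x _ ht1, ih d0 dt ht2]
          -- recombine: (y :: rest) = take (mid-1) ++ (d0 :: dt)
          have hsplit : (y :: rest).take (mid - 1) ++ (d0 :: dt) = y :: rest := by
            have h1 : (x :: y :: rest).take mid ++ (x :: y :: rest).drop mid = x :: y :: rest :=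
              List.take_append_drop mid (x :: y :: rest)
            rw [htake, hdrop] at h1
            simpa using h1
          calc op (((y :: rest).take (mid - 1)).foldl op x) (dt.foldl op d0)
              = ((y :: rest).take (mid - 1) ++ (d0 :: dt)).foldl op x := by
                rw [List.foldl_append]
                simp only [List.foldl_cons]
                rw [pv_foldl_pull op hassoc]
            _ = (y :: rest).foldl op x := by rw [hsplit]

-- A's triple fold computes the three separate folds componentwise
theorem pv_triple_fold (rest : List Int) (a o x : Int) :
    rest.foldl
      (fun (s : Int × Int × Int) num =>
        (PySem.Int.band s.1 num, PySem.Int.bor s.2.1 num, PySem.Int.bxor s.2.2 num))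
      (a, o, x)
    = (rest.foldl PySem.Int.band a, rest.foldl PySem.Int.bor o, rest.foldl PySem.Int.bxor x) := by
  induction rest generalizing a o x with
  | nil => rfl
  | cons n t ih => simp [List.foldl, ih]

-- ===== VERDICT (by name: the statement is the Claim_ definition above) =====
theorem bitwise_operations_spec : Claim_equal_bitwise_operations := by
  intro numbers _ hpre
  unfold Spec_bitwise_operations
  match numbers with
  | [] => exact absurd rfl hpre
  | n0 :: rest =>
      simp only [bitwise_operations, bitwise_operations_alt, pv_triple_fold,
        pv_tree_eq_foldl PySem.Int.band pv_band_assoc,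
        pv_tree_eq_foldl PySem.Int.bor pv_bor_assoc,
        pv_tree_eq_foldl PySem.Int.bxor pv_bxor_assoc]
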